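-- pv_equiv track=rewrite | github.com/SorontarX10/weekly-seo-agent | weekly_seo_agent/weekly_reporting_agent/weekly_news.py | _domain_matches
-- ===== SOURCE A (Python) =====
-- def _domain_matches(domain: str, allowlist: tuple[str, ...]) -> bool:
--     if not allowlist:
--         return True
--     for allowed in allowlist:
--         allowed = allowed.strip().lower()
--         if not allowed:
--             continue
--         if domain == allowed:
--             return True
--         if domain.endswith("." + allowed):
--             return True
--     return False
-- ===== SOURCE B (Python) =====
-- def _domain_matches(domain: str, allowlist: tuple[str, ...]) -> bool:
--     if not allowlist:
--         return True
--     allowed = {a.strip().lower() for a in allowlist if a.strip()}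
--     candidates = {domain} | {domain[i + 1:] for i, ch in enumerate(domain) if ch == "."}
--     return any(c in allowed for c in candidates)
-- ===== Notes on version B (the rewrite author's own statement) =====
-- stated objective: idiomatic
-- what changed: Instead of scanning the allowlist and calling endswith per entry, B builds a set of cleaned allowlist entries once and intersects it with the set of the domain's dot-suffix candidates (domain plus every suffix after a '.'), so suffix matching becomes set membership.
import Mathlib
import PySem

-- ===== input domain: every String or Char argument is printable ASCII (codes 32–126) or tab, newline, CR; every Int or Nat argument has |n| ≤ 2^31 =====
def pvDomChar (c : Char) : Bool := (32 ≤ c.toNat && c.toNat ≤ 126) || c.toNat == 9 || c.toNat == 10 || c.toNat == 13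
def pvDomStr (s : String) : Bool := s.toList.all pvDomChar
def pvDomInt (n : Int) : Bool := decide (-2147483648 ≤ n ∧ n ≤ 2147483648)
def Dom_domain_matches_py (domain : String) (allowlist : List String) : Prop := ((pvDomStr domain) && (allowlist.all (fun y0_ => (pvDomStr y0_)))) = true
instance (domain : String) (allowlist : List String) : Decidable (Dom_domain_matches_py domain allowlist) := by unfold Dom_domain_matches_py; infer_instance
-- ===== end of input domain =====

-- B replaces A's per-entry endswith scan by intersecting the set of cleaned allowlist
-- entries with the set of the domain's dot-suffix candidates (objective: idiomatic).

-- ===== PORT A =====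
-- the for-loop of A, with early returns, as structural recursion
def aLoop (domain : String) : List String → Bool
  | [] => false
  | a :: rest =>
    let allowed := PySem.Str.lower (PySem.Str.strip a)
    if allowed = "" then aLoop domain rest
    else if domain = allowed then true
    else if PySem.Str.endswith domain ("." ++ allowed) then true
    else aLoop domain rest

def domain_matches_py (domain : String) (allowlist : List String) : Bool :=
  if allowlist = [] then true else aLoop domain allowlist

-- ===== PORT B =====
def domain_matches_py_alt (domain : String) (allowlist : List String) : Bool :=
  if allowlist = [] then true
  else
    let allowed : PySem.Set String :=
      PySem.Set.ofList ((allowlist.filter (fun a => PySem.Str.strip a ≠ "")).map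
        (fun a => PySem.Str.lower (PySem.Str.strip a)))
    let candidates : PySem.Set String :=
      PySem.Set.union (PySem.Set.ofList [domain])
        ((PySem.List.enumerate domain.toList 0).filterMap
          (fun p => if p.2 = '.' then
              some (String.mk (PySem.List.slice domain.toList (some (p.1 + 1)) none))
            else none))
    candidates.any (fun c => PySem.Set.contains allowed c)

-- ===== PRECONDITION & SPEC =====
def Spec_domain_matches_py (domain : String) (allowlist : List String) (out : Bool) : Prop := out = domain_matches_py_alt domain allowlist
instance (domain : String) (allowlist : List String) (out : Bool) : Decidable (Spec_domain_matches_py domain allowlist out) := by unfold Spec_domain_matches_py; infer_instance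

-- ===== CLAIM (what is proved, stated in full; the proofs are below) =====
def Claim_equal_domain_matches_py : Prop := ∀ (domain : String) (allowlist : List String), Dom_domain_matches_py domain allowlist → Spec_domain_matches_py domain allowlist (domain_matches_py domain allowlist)

-- ===== LEMMAS AND PROOFS =====

-- '.'::t is a suffix of cs iff t is the tail after some '.' in cs
theorem dotSuffix_iff (cs t : List Char) :
    ('.' :: t) <:+ cs ↔ ∃ k, ∃ _ : k < cs.length, cs[k] = '.' ∧ cs.drop (k+1) = t := by
  constructor
  · rintro ⟨u, rfl⟩
    refine ⟨u.length, by simp, by simp, ?_⟩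
    rw [show u ++ '.' :: t = (u ++ ['.']) ++ t by simp, show u.length + 1 = (u ++ ['.']).length by simp]
    simp
  · rintro ⟨k, hk, hget, hdrop⟩
    refine ⟨cs.take k, ?_⟩
    have h1 : cs.drop k = cs[k] :: cs.drop (k+1) := List.drop_eq_getElem_cons hk
    rw [← hdrop, ← hget, ← h1, List.take_append_drop]

theorem lower_eq_empty_iff (s : String) : PySem.Str.lower s = "" ↔ s = "" := by
  constructor
  · intro h
    have := congrArg String.toList h
    simp [PySem.Chars.lower] at this
    exact String.ext (by simpa [String.data] using this)
  · rintro rfl; decide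

theorem aLoop_true_iff (d : String) (l : List String) :
    aLoop d l = true ↔ ∃ a ∈ l, PySem.Str.lower (PySem.Str.strip a) ≠ "" ∧
      (d = PySem.Str.lower (PySem.Str.strip a) ∨
       PySem.Str.endswith d ("." ++ PySem.Str.lower (PySem.Str.strip a)) = true) := by
  induction l with
  | nil => simp [aLoop]
  | cons a rest ih =>
    simp only [aLoop]
    split_ifs with h1 h2 h3 <;> simp_all

theorem alt_true_iff (d : String) (l : List String) (hl : ¬ l = []) :
    domain_matches_py_alt d l = true ↔ ∃ a ∈ l, PySem.Str.strip a ≠ "" ∧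
      (PySem.Str.lower (PySem.Str.strip a) = d ∨
       ∃ k, ∃ _ : k < d.toList.length, d.toList[k] = '.' ∧
         PySem.Str.lower (PySem.Str.strip a) = String.mk (d.toList.drop (k+1))) := by
  unfold domain_matches_py_alt
  simp only [if_neg hl, List.any_eq_true, PySem.Set.mem_union, PySem.Set.mem_ofList,
    List.mem_singleton, List.mem_filterMap, PySem.List.mem_enumerate_iff,
    PySem.Set.contains, List.contains_iff_mem, PySem.Set.mem_ofList,
    List.mem_map, List.mem_filter, Option.ite_none_right_eq_some, Option.some.injEq,
    decide_eq_true_eq]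
  constructor
  · rintro ⟨x, hx, a, ⟨ha, hne⟩, rfl⟩
    refine ⟨a, ha, hne, ?_⟩
    rcases hx with rfl | ⟨p, ⟨k, hk, rfl⟩, hdot, hx⟩
    · exact Or.inl rfl
    · refine Or.inr ⟨k, hk, hdot, ?_⟩
      rw [← hx]
      congr 1
      rw [show ((0:Int) + ↑k + 1) = ((k+1 : Nat) : Int) by push_cast; ring]
      exact PySem.List.slice_from_natCast d.toList (k+1)
  · rintro ⟨a, ha, hne, hcase⟩
    refine ⟨PySem.Str.lower (PySem.Str.strip a), ?_, a, ⟨ha, hne⟩, rfl⟩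
    rcases hcase with h | ⟨k, hk, hdot, h⟩
    · exact Or.inl h
    · refine Or.inr ⟨(0 + (k:Int), d.toList[k]), ⟨k, hk, rfl⟩, hdot, ?_⟩
      rw [h]
      congr 1
      rw [show ((0:Int) + ↑k + 1) = ((k+1 : Nat) : Int) by push_cast; ring]
      exact PySem.List.slice_from_natCast d.toList (k+1)

-- per-entry bridge: A's equality/endswith test ↔ B's candidate-membership test
theorem case_bridge (d al : String) :
    (d = al ∨ PySem.Str.endswith d ("." ++ al) = true) ↔
    (al = d ∨ ∃ k, ∃ _ : k < d.toList.length, d.toList[k] = '.' ∧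
       al = String.mk (d.toList.drop (k+1))) := by
  apply or_congr eq_comm
  rw [show PySem.Str.endswith d ("." ++ al) = PySem.Chars.endswith d.toList ('.' :: al.toList) by
        simp, PySem.Chars.endswith_iff, dotSuffix_iff]
  refine exists_congr fun k => exists_congr fun hk => and_congr_right fun _ => ?_
  have hmk : ∀ t : List Char, (String.mk t).toList = t :=
    fun t => Eq.symm ((fun {l} {s} => String.ofList_eq.mp) rfl)
  constructor
  · intro h; exact String.ext (by rw [hmk]; exact h.symm)
  · rintro rfl; rw [hmk]

-- ===== VERDICT (by name: the statement is the Claim_ definition above) =====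
theorem domain_matches_py_spec : Claim_equal_domain_matches_py := by
  unfold Claim_equal_domain_matches_py Spec_domain_matches_py
  intro d l _
  by_cases hl : l = []
  · subst hl; rfl
  · rw [show domain_matches_py d l = aLoop d l by simp [domain_matches_py, hl]]
    rw [Bool.eq_iff_iff, aLoop_true_iff, alt_true_iff d l hl]
    refine exists_congr fun a => and_congr_right fun _ => ?_
    rw [ne_eq, lower_eq_empty_iff, ← ne_eq]
    exact and_congr_right fun _ => case_bridge d (PySem.Str.lower (PySem.Str.strip a))
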